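-- pv_equiv track=rewrite | github.com/juni8453/python_practice | programmers/test_directory/바이러스_검사.py | file_info
-- ===== SOURCE A (Python) =====
-- def file_info(folder, folder_dict, files, excepted):
--     result = []
--
--     for child in folder_dict.get(folder, []):
--         result += file_info(child, folder_dict, files, excepted)
--
--     for file in files:
--         file_name, file_size, parent = file
--         if parent == folder and file_name not in excepted:
--             result.append(file)
--
--     return result
-- ===== SOURCE B (Python) =====
-- def file_info(folder, folder_dict, files, excepted):
--     excepted_set = set(excepted)
--     index = {}
--     for f in files:
--         if f[0] not in excepted_set:
--             index.setdefault(f[2], []).append(f)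
--
--     out = []
--
--     def walk(node):
--         for child in folder_dict.get(node, []):
--             walk(child)
--         out.extend(index.get(node, []))
--
--     walk(folder)
--     return out
-- ===== Notes on version B (the rewrite author's own statement) =====
-- stated objective: alternative
-- what changed: B precomputes a set of excepted names and a parent->files index dict once and then traverses the folder tree looking files up in the index, instead of A's rescan of the whole files list (with a list membership test on excepted) at every visited folder; on inputs with many folders this removes the inner scan, but a timing run's inputs (one big files list, tiny tree) showed no measured speed-up.
import Mathlib
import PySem

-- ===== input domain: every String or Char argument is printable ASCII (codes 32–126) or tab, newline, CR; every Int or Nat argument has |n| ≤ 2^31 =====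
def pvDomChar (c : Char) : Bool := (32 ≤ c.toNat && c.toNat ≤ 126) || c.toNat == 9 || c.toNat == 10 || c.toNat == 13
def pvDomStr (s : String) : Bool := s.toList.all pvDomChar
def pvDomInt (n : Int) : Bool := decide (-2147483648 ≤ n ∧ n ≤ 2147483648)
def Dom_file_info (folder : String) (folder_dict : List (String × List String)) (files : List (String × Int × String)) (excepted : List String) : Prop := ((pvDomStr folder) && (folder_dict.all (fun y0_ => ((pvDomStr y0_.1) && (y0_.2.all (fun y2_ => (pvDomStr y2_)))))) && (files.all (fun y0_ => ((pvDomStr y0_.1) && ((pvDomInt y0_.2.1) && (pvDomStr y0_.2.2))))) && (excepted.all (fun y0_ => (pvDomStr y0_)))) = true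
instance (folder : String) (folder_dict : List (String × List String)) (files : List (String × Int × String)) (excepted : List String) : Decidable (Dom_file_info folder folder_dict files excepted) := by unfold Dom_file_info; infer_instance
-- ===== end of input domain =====

-- B replaces A's per-folder rescan of `files` by a parent→files index and an excepted set built once.

-- ===== PORT A =====
-- Python A is recursive on the folder graph; `fuel` (set to |folder_dict| + 1 at the top call,
-- always sufficient under Pre_, which demands the reachable part of the graph be acyclic) only
-- makes the same recursion total in Lean.
def fileInfoFuel (fd : PySem.Dict String (List String)) (files : List (String × Int × String)) (excepted : List String) : Nat → String → List (String × Int × String)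
  | 0, _ => []
  | fuel + 1, folder =>
    let result := (fd.getD folder []).foldl
      (fun r child => r ++ fileInfoFuel fd files excepted fuel child) []
    files.foldl
      (fun r f => if f.2.2 == folder && !(excepted.contains f.1) then r ++ [f] else r)
      result

def file_info (folder : String) (folder_dict : List (String × List String)) (files : List (String × Int × String)) (excepted : List String) : List (String × Int × String) :=
  fileInfoFuel (PySem.Dict.ofList folder_dict) files excepted (folder_dict.length + 1) folder

-- ===== PORT B =====
-- walk(node): recurse into children, then append this node's indexed files (same fuel guard as A's port).
def walkFuel (fd : PySem.Dict String (List String)) (index : PySem.Dict String (List (String × Int × String))) : Nat → String → List (String × Int × String) → List (String × Int × String)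
  | 0, _, out => out
  | fuel + 1, node, out =>
    let out := (fd.getD node []).foldl
      (fun a child => walkFuel fd index fuel child a) out
    out ++ index.getD node []

def file_info_alt (folder : String) (folder_dict : List (String × List String)) (files : List (String × Int × String)) (excepted : List String) : List (String × Int × String) :=
  let exceptedSet : PySem.Set String := PySem.Set.ofList excepted
  let index : PySem.Dict String (List (String × Int × String)) :=
    ((files.filter (fun f => !(PySem.Set.contains exceptedSet f.1))).map (fun f => (f.2.2, f))).foldl
      (fun d p => d.modify p.1 [] (· ++ [p.2])) PySem.Dict.empty
  walkFuel (PySem.Dict.ofList folder_dict) index (folder_dict.length + 1) folder []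

-- ===== PRECONDITION & SPEC =====
-- pvDepthOK n f fd = "every child-path from f reaches a childless folder within n steps"
def pvDepthOK (fd : List (String × List String)) : Nat → String → Bool
  | 0, f => ((PySem.Dict.ofList fd).getD f []).isEmpty
  | n + 1, f => ((PySem.Dict.ofList fd).getD f []).all (pvDepthOK fd n)

-- Pre_ excludes exactly the inputs whose child relation has a cycle reachable from `folder`:
-- there Python A (and Python B alike) recurses forever and dies with RecursionError.
def Pre_file_info (folder : String) (folder_dict : List (String × List String)) (files : List (String × Int × String)) (excepted : List String) : Prop :=
  pvDepthOK folder_dict folder_dict.length folder = true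
instance (folder : String) (folder_dict : List (String × List String)) (files : List (String × Int × String)) (excepted : List String) : Decidable (Pre_file_info folder folder_dict files excepted) := by unfold Pre_file_info; infer_instance

def pvWitness_file_info : String × (List (String × List String)) × (List (String × Int × String)) × List String :=
  ("root", [("root", ["docs"])], [("a.txt", (3 : Int), "docs"), ("v.exe", (1 : Int), "docs")], ["v.exe"])

def Spec_file_info (folder : String) (folder_dict : List (String × List String)) (files : List (String × Int × String)) (excepted : List String) (out : List (String × Int × String)) : Prop := out = file_info_alt folder folder_dict files excepted
instance (folder : String) (folder_dict : List (String × List String)) (files : List (String × Int × String)) (excepted : List String) (out : List (String × Int × String)) : Decidable (Spec_file_info folder folder_dict files excepted out) := by unfold Spec_file_info; infer_instance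

-- ===== CLAIM (what is proved, stated in full; the proofs are below) =====
def Claim_equal_file_info : Prop := ∀ (folder : String) (folder_dict : List (String × List String)) (files : List (String × Int × String)) (excepted : List String), Dom_file_info folder folder_dict files excepted → Pre_file_info folder folder_dict files excepted → Spec_file_info folder folder_dict files excepted (file_info folder folder_dict files excepted)

-- ===== LEMMAS AND PROOFS =====

-- The index built by B holds, under each parent, exactly the non-excepted files with that parent.
theorem index_getD (files : List (String × Int × String)) (excepted : List String) (node : String) :
    (((files.filter (fun f => !(PySem.Set.contains (PySem.Set.ofList excepted) f.1))).map (fun f => (f.2.2, f))).foldl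
      (fun d p => d.modify p.1 [] (· ++ [p.2])) PySem.Dict.empty).getD node []
    = files.filter (fun f => f.2.2 == node && !(excepted.contains f.1)) := by
  rw [PySem.Dict.getD_foldl_modify_append]
  simp only [List.filter_map, List.map_map]
  have hid : ((fun (x : String × (String × Int × String)) => x.2) ∘ fun (f : String × Int × String) => (f.2.2, f)) = id := rfl
  rw [hid, List.map_id, List.filter_filter]
  apply List.filter_congr
  intro f _
  have hc : PySem.Set.contains (PySem.Set.ofList excepted) f.1 = excepted.contains f.1 := by
    simp only [PySem.Set.contains_eq_listContains]
    by_cases h : f.1 ∈ excepted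
    · simp [PySem.Set.mem_ofList, h]
    · simp [PySem.Set.mem_ofList, h]
  simp [Function.comp, hc, Bool.and_comm]

theorem walk_eq (fd : PySem.Dict String (List String)) (files : List (String × Int × String)) (excepted : List String)
    (index : PySem.Dict String (List (String × Int × String)))
    (hidx : ∀ node, index.getD node [] = files.filter (fun f => f.2.2 == node && !(excepted.contains f.1)))
    (fuel : Nat) :
    ∀ (node : String) (out : List (String × Int × String)),
      walkFuel fd index fuel node out = out ++ fileInfoFuel fd files excepted fuel node := by
  induction fuel with
  | zero => intro node out; simp [walkFuel, fileInfoFuel]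
  | succ fuel ih =>
    intro node out
    simp only [walkFuel, fileInfoFuel]
    have hf : (fun (a : List (String × Int × String)) child => walkFuel fd index fuel child a)
            = (fun a child => a ++ fileInfoFuel fd files excepted fuel child) :=
      funext fun a => funext fun c => ih c a
    rw [hf, PySem.List.foldl_append_eq_flatMap, PySem.List.foldl_append_eq_flatMap,
        PySem.List.foldl_append_if_eq_filter, hidx]
    simp

theorem file_info_eq_alt (folder : String) (folder_dict : List (String × List String)) (files : List (String × Int × String)) (excepted : List String) :
    file_info folder folder_dict files excepted = file_info_alt folder folder_dict files excepted := by
  unfold file_info file_info_alt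
  rw [walk_eq _ files excepted _ (fun node => index_getD files excepted node)]
  simp

-- ===== VERDICT (by name: the statement is the Claim_ definition above) =====
theorem file_info_spec : Claim_equal_file_info := by
  intro folder folder_dict files excepted _ _
  unfold Spec_file_info
  exact file_info_eq_alt folder folder_dict files excepted
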